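-- pv_equiv track=rewrite | github.com/bryanalves/advent-of-code-2023 | src/18.py | area
-- ===== SOURCE A (Python) =====
-- def area(directions):
--     pos = (0, 0)
--     perimeter = 0
--     corners = []
--     dirmap = {
--         'U': (-1, 0),
--         'D': (1, 0),
--         'L': (0, -1),
--         'R': (0, 1)
--     }
--
--     for dir, dist in directions:
--         dy, dx = dirmap[dir]
--         pos = (pos[0] + dy * dist, pos[1] + dx * dist)
--         perimeter += dist
--         corners.append(pos)
--
--     return shoelace(corners) + perimeter // 2 + 1
--
-- def shoelace(points):
--     result = 0
--     for i in range(len(points) - 1):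
--         x1, y1 = points[i]
--         x2, y2 = points[i + 1]
--         result += x1 * y2 - x2 * y1
--
--     return abs(result) // 2
-- ===== SOURCE B (Python) =====
-- def area(directions):
--     # Green's-theorem line integral over horizontal segments only: s = sum of
--     # y*dx over L/R moves; by telescoping, twice the signed area of the walked
--     # path (A's shoelace sum) equals 2*s - y*x at the endpoint.
--     y = 0
--     x = 0
--     s = 0
--     perimeter = 0
--     for dir, dist in directions:
--         if dir == 'U':
--             y -= dist
--         elif dir == 'D':
--             y += dist
--         elif dir == 'L':
--             x -= dist
--             s -= y * dist
--         elif dir == 'R':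
--             x += dist
--             s += y * dist
--         else:
--             raise KeyError(dir)
--         perimeter += dist
--     return abs(2 * s - y * x) // 2 + perimeter // 2 + 1
-- ===== Notes on version B (the rewrite author's own statement) =====
-- stated objective: alternative
-- what changed: B replaces the corners list + cross-product shoelace with a Green's-theorem line integral: it accumulates y*dx over horizontal (L/R) moves only and recovers twice the signed area as 2*s - y*x at the endpoint by telescoping, so there is no vertex list and no cross products.
import Mathlib
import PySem

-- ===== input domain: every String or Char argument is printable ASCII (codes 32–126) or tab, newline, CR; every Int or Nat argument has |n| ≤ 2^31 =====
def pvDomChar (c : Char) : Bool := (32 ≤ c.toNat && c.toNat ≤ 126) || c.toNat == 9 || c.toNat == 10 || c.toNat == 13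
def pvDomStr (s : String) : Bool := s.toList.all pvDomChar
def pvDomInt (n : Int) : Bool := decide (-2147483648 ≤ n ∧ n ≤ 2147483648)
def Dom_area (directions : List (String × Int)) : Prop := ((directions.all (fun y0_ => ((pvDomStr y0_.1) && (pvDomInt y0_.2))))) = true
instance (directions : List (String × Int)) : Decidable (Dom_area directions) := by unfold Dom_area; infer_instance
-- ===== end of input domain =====

-- B computes the area as a Green's-theorem line integral over horizontal moves only
-- (s = Σ y·dx, twice the signed area = 2·s − y·x at the endpoint), no corners list.


-- ===== PORT A =====
-- dirmap lookup; the 'else (0,0)' arm is the KeyError case, excluded by Pre_area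
def dirmapA (d : String) : Int × Int :=
  if d = "U" then (-1, 0)
  else if d = "D" then (1, 0)
  else if d = "L" then (0, -1)
  else if d = "R" then (0, 1)
  else (0, 0)

-- the loop of A: state (pos, perimeter, corners)
def walkA : (Int × Int) → Int → List (Int × Int) → List (String × Int) →
    (Int × Int) × Int × List (Int × Int)
  | pos, perim, corners, [] => (pos, perim, corners)
  | pos, perim, corners, (d, dist) :: t =>
      let dydx := dirmapA d
      let np := (pos.1 + dydx.1 * dist, pos.2 + dydx.2 * dist)
      walkA np (perim + dist) (corners ++ [np]) t

-- 'for i in range(len(points)-1)': the sum over adjacent pairs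
def shoelaceSum : List (Int × Int) → Int
  | (x1, y1) :: (x2, y2) :: rest => x1 * y2 - x2 * y1 + shoelaceSum ((x2, y2) :: rest)
  | _ => 0

def shoelace (points : List (Int × Int)) : Int :=
  PySem.Int.floordiv |shoelaceSum points| 2

def area (directions : List (String × Int)) : Int :=
  let r := walkA (0, 0) 0 [] directions
  shoelace r.2.2 + PySem.Int.floordiv r.2.1 2 + 1

-- ===== PORT B =====
-- B's single loop: state (y, x, s, perimeter); the final 'raise KeyError' arm is
-- the excluded-by-Pre_area case (modelled as no update, never reached under Pre_).
def walkB : Int → Int → Int → Int → List (String × Int) → Int × Int × Int × Int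
  | y, x, s, perim, [] => (y, x, s, perim)
  | y, x, s, perim, (d, dist) :: t =>
      if d = "U" then walkB (y - dist) x s (perim + dist) t
      else if d = "D" then walkB (y + dist) x s (perim + dist) t
      else if d = "L" then walkB y (x - dist) (s - y * dist) (perim + dist) t
      else if d = "R" then walkB y (x + dist) (s + y * dist) (perim + dist) t
      else (y, x, s, perim)

def area_alt (directions : List (String × Int)) : Int :=
  let r := walkB 0 0 0 0 directions
  PySem.Int.floordiv |2 * r.2.2.1 - r.1 * r.2.1| 2 + PySem.Int.floordiv r.2.2.2 2 + 1

-- ===== PRECONDITION & SPEC =====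
-- Pre_ excludes exactly the inputs whose direction string is not a dirmap key,
-- on which the Python A (and B) raise KeyError.
def Pre_area (directions : List (String × Int)) : Prop :=
  ∀ p ∈ directions, p.1 = "U" ∨ p.1 = "D" ∨ p.1 = "L" ∨ p.1 = "R"
instance (directions : List (String × Int)) : Decidable (Pre_area directions) := by
  unfold Pre_area; infer_instance

def pvWitness_area : (List (String × Int)) := [("R", 6), ("D", 5), ("L", 6), ("U", 5)]

def Spec_area (directions : List (String × Int)) (out : Int) : Prop := out = area_alt directions
instance (directions : List (String × Int)) (out : Int) : Decidable (Spec_area directions out) := by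
  unfold Spec_area; infer_instance

-- ===== CLAIM (what is proved, stated in full; the proofs are below) =====
def Claim_equal_area : Prop := ∀ (directions : List (String × Int)),
  Dom_area directions → Pre_area directions → Spec_area directions (area directions)

-- ===== LEMMAS AND PROOFS =====

-- the trail of corners produced by walking from p
def trail : (Int × Int) → List (String × Int) → List (Int × Int)
  | _, [] => []
  | p, (d, dist) :: t =>
      let dydx := dirmapA d
      let np := (p.1 + dydx.1 * dist, p.2 + dydx.2 * dist)
      np :: trail np t

def endPos : (Int × Int) → List (String × Int) → Int × Int
  | p, [] => p
  | p, (d, dist) :: t =>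
      let dydx := dirmapA d
      endPos (p.1 + dydx.1 * dist, p.2 + dydx.2 * dist) t

def sumD : List (String × Int) → Int
  | [] => 0
  | (_, dist) :: t => dist + sumD t

theorem walkA_eq : ∀ (l : List (String × Int)) (p : Int × Int) (perim : Int)
    (corners : List (Int × Int)),
    walkA p perim corners l = (endPos p l, perim + sumD l, corners ++ trail p l) := by
  intro l
  induction l with
  | nil => intro p perim corners; simp [walkA, endPos, sumD, trail]
  | cons h t ih =>
      intro p perim corners
      obtain ⟨d, dist⟩ := h
      simp [walkA, endPos, sumD, trail, ih]
      ring

theorem shoelace_cons (a b : Int × Int) (xs : List (Int × Int)) :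
    shoelaceSum (a :: b :: xs) = a.1 * b.2 - b.1 * a.2 + shoelaceSum (b :: xs) := by
  obtain ⟨x1, y1⟩ := a; obtain ⟨x2, y2⟩ := b; simp [shoelaceSum]

-- the main invariant: under Pre_, B's walk ends at the same position with the same
-- perimeter, and its integral s satisfies 2·s' − y'·x' = 2·s − y·x + shoelaceSum(p::trail)
theorem walkB_eq : ∀ (l : List (String × Int)),
    (∀ q ∈ l, q.1 = "U" ∨ q.1 = "D" ∨ q.1 = "L" ∨ q.1 = "R") →
    ∀ (p : Int × Int) (s perim : Int),
    (walkB p.1 p.2 s perim l).1 = (endPos p l).1 ∧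
    (walkB p.1 p.2 s perim l).2.1 = (endPos p l).2 ∧
    (walkB p.1 p.2 s perim l).2.2.2 = perim + sumD l ∧
    2 * (walkB p.1 p.2 s perim l).2.2.1 - (endPos p l).1 * (endPos p l).2
      = 2 * s - p.1 * p.2 + shoelaceSum (p :: trail p l) := by
  intro l
  induction l with
  | nil =>
      intro _ p s perim
      simp [walkB, endPos, sumD, trail, shoelaceSum]
  | cons h t ih =>
      intro hv p s perim
      obtain ⟨d, dist⟩ := h
      have hd : d = "U" ∨ d = "D" ∨ d = "L" ∨ d = "R" := hv (d, dist) (by simp)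
      have hv' : ∀ q ∈ t, q.1 = "U" ∨ q.1 = "D" ∨ q.1 = "L" ∨ q.1 = "R" :=
        fun q hq => hv q (by simp [hq])
      rcases hd with hd | hd | hd | hd <;> subst hd
      · have H := ih hv' (p.1 - dist, p.2) s (perim + dist)
        simp [walkB, endPos, trail, sumD, dirmapA, shoelace_cons, ← sub_eq_add_neg] at H ⊢
        obtain ⟨H1, H2, H3, H4⟩ := H
        refine ⟨H1, H2, by omega, by linear_combination H4⟩
      · have H := ih hv' (p.1 + dist, p.2) s (perim + dist)
        simp [walkB, endPos, trail, sumD, dirmapA, shoelace_cons] at H ⊢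
        obtain ⟨H1, H2, H3, H4⟩ := H
        refine ⟨H1, H2, by omega, by linear_combination H4⟩
      · have H := ih hv' (p.1, p.2 - dist) (s - p.1 * dist) (perim + dist)
        simp [walkB, endPos, trail, sumD, dirmapA, shoelace_cons, ← sub_eq_add_neg] at H ⊢
        obtain ⟨H1, H2, H3, H4⟩ := H
        refine ⟨H1, H2, by omega, by linear_combination H4⟩
      · have H := ih hv' (p.1, p.2 + dist) (s + p.1 * dist) (perim + dist)
        simp [walkB, endPos, trail, sumD, dirmapA, shoelace_cons] at H ⊢
        obtain ⟨H1, H2, H3, H4⟩ := H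
        refine ⟨H1, H2, by omega, by linear_combination H4⟩

theorem shoelace_cons_origin (xs : List (Int × Int)) :
    shoelaceSum ((0, 0) :: xs) = shoelaceSum xs := by
  cases xs with
  | nil => simp [shoelaceSum]
  | cons h t => obtain ⟨x, y⟩ := h; simp [shoelaceSum]

-- ===== VERDICT (by name: the statement is the Claim_ definition above) =====
theorem area_spec : Claim_equal_area := by
  intro directions _ hpre
  unfold Spec_area area area_alt shoelace
  rw [walkA_eq]
  obtain ⟨h1, h2, h3, h4⟩ := walkB_eq directions hpre (0, 0) 0 0
  rw [shoelace_cons_origin] at h4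
  simp only [List.nil_append]
  rw [h3]
  have : 2 * (walkB 0 0 0 0 directions).2.2.1
      - (walkB 0 0 0 0 directions).1 * (walkB 0 0 0 0 directions).2.1
      = shoelaceSum (trail (0, 0) directions) := by
    simp only [h1, h2] at *; omega
  rw [this]
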